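-- pv_equiv track=rewrite | github.com/biranchikulesika/AuthLens | modules/strengthmeter.py | has_sequential_pattern
-- ===== SOURCE A (Python) =====
-- SEQUENTIAL_STRINGS = [
--     "abcdefghijklmnopqrstuvwxyz",
--     "0123456789",
--     "qwertyuiop",
--     "asdfghjkl",
--     "zxcvbnm",
-- ]
--
-- def has_sequential_pattern(password: str, min_len: int = 4) -> bool:
--     """Detect sequential patterns."""
--     lower_pw = password.lower()
--     for i in range(len(lower_pw) - min_len + 1):
--         sub = lower_pw[i : i + min_len]
--         for seq in SEQUENTIAL_STRINGS:
--             if sub in seq: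
--                 return True
--     return False
-- ===== SOURCE B (Python) =====
-- SEQUENTIAL_STRINGS = [
--     "abcdefghijklmnopqrstuvwxyz",
--     "0123456789",
--     "qwertyuiop",
--     "asdfghjkl",
--     "zxcvbnm",
-- ]
--
-- def has_sequential_pattern(password: str, min_len: int = 4) -> bool:
--     """Detect sequential patterns (single streaming pass over the password).
--
--     For each keyboard/alphabet sequence we keep the length of the current run of
--     consecutive sequence characters ending at the character just read, and
--     report a pattern as soon as one run reaches min_len. Single pass, no substring
--     searches.
--     """
--     if min_len <= 0:
--         return True  # an empty (or negative-length) pattern is trivially present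
--     state = [(0, -2) for _ in SEQUENTIAL_STRINGS]  # (run length, index of prev char in seq)
--     for ch in password.lower():
--         new_state = []
--         for (run, prev), seq in zip(state, SEQUENTIAL_STRINGS):
--             j = seq.find(ch)
--             if j < 0:
--                 run = 0
--             elif j == prev + 1:
--                 run += 1
--             else:
--                 run = 1
--             new_state.append((run, j))
--         state = new_state
--         if any(run >= min_len for run, _ in state):
--             return True
--     return False
-- ===== Notes on version B (the rewrite author's own statement) =====
-- stated objective: alternative
-- what changed: A slides a window over the password and substring-searches every window in every sequence; B makes one streaming pass, keeping per sequence the length of the current run of consecutive sequence characters and returning True as soon as a run reaches min_len (no per-window substring searches).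
import Mathlib
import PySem

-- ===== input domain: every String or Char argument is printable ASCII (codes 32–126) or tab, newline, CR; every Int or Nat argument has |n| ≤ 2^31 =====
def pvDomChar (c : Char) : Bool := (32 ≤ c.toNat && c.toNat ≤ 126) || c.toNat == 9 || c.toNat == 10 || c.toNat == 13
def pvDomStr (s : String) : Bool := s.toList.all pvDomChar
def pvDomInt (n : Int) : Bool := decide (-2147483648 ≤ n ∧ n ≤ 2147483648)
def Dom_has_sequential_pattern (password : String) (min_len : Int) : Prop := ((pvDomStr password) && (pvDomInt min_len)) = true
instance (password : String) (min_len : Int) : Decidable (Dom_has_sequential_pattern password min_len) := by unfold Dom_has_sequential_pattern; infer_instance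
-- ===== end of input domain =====

-- B replaces A's window-by-window substring search with a single streaming pass that
-- tracks, per sequence, the run of consecutive sequence characters ending at the
-- current position (objective: alternative — a different algorithm of comparable cost).

def SEQUENTIAL_STRINGS : List (List Char) :=
  ["abcdefghijklmnopqrstuvwxyz".toList, "0123456789".toList, "qwertyuiop".toList,
   "asdfghjkl".toList, "zxcvbnm".toList]

-- ===== PORT A =====
-- A's 'for i in range(len(lower_pw) - min_len + 1)' with its early 'return True',
-- ported as Python's lazy range: count i upward, stop at 'stop'
def pvALoop (lower_pw : List Char) (min_len stop i : Int) : Bool :=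
  if _h : i < stop then
    let sub := PySem.List.slice lower_pw (some i) (some (i + min_len))
    if SEQUENTIAL_STRINGS.any (fun seq => PySem.Chars.isIn sub seq) then true
    else pvALoop lower_pw min_len stop (i + 1)
  else false
termination_by (stop - i).toNat
decreasing_by omega

def has_sequential_pattern (password : String) (min_len : Int) : Bool :=
  let lower_pw := PySem.Chars.lower password.toList
  pvALoop lower_pw min_len ((lower_pw.length : Int) - min_len + 1) 0

-- ===== PORT B =====
-- one step of B's inner loop: ((run, prev), seq) and the current char ↦ (run', j)
def pvBStep (c : Char) (rps : (Int × Int) × List Char) : Int × Int :=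
  let j := PySem.Chars.find rps.2 [c]
  if j < 0 then (0, j)
  else if j = rps.1.2 + 1 then (rps.1.1 + 1, j)
  else (1, j)

-- B's char loop with its early exit ('return True')
def pvBLoop (min_len : Int) (chars : List Char) (state : List (Int × Int)) : Bool :=
  match chars with
  | [] => false
  | c :: rest =>
    let st := (state.zip SEQUENTIAL_STRINGS).map (pvBStep c)
    if st.any (fun rp => min_len ≤ rp.1) then true
    else pvBLoop min_len rest st

def has_sequential_pattern_alt (password : String) (min_len : Int) : Bool :=
  if min_len ≤ 0 then true
  else pvBLoop min_len (PySem.Chars.lower password.toList)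
         (SEQUENTIAL_STRINGS.map fun _ => (0, -2))

-- ===== PRECONDITION & SPEC =====
def Spec_has_sequential_pattern (password : String) (min_len : Int) (out : Bool) : Prop := out = has_sequential_pattern_alt password min_len
instance (password : String) (min_len : Int) (out : Bool) : Decidable (Spec_has_sequential_pattern password min_len out) := by unfold Spec_has_sequential_pattern; infer_instance

-- ===== CLAIM (what is proved, stated in full; the proofs are below) =====
def Claim_equal_has_sequential_pattern : Prop := ∀ (password : String) (min_len : Int), Dom_has_sequential_pattern password min_len → Spec_has_sequential_pattern password min_len (has_sequential_pattern password min_len)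

-- ===== LEMMAS AND PROOFS =====

-- B's per-sequence state after consuming xs
def seqFold (s : List Char) (xs : List Char) : Int × Int :=
  xs.foldl (fun rp c => pvBStep c (rp, s)) (0, -2)

theorem singleton_infix {s : List Char} {c : Char} (h : c ∈ s) : [c] <:+: s := by
  obtain ⟨t, u, rfl⟩ := List.append_of_mem h
  exact ⟨t, u, by simp⟩

theorem find_singleton_nonneg_iff (s : List Char) (c : Char) :
    0 ≤ PySem.Chars.find s [c] ↔ c ∈ s := by
  rw [PySem.Chars.find_nonneg_iff]
  constructor
  · exact fun h => h.subset (by simp)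
  · intro h
    obtain ⟨t, u, rfl⟩ := List.append_of_mem h
    exact ⟨t, u, by simp⟩

theorem find_singleton_spec {s : List Char} {c : Char}
    (h : 0 ≤ PySem.Chars.find s [c]) :
    (PySem.Chars.find s [c]).toNat < s.length ∧
      s[(PySem.Chars.find s [c]).toNat]? = some c := by
  obtain ⟨hpre, -⟩ := PySem.Chars.find_spec h
  obtain ⟨t, ht⟩ := hpre
  have hlen : t.length + 1 = s.length - (PySem.Chars.find s [c]).toNat := by
    simpa using congrArg List.length ht
  have h0 : (List.drop (PySem.Chars.find s [c]).toNat s)[0]? = some c := by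
    rw [← ht]; rfl
  rw [List.getElem?_drop] at h0
  exact ⟨by omega, by simpa using h0⟩

theorem find_eq_of_getElem {s : List Char} (hnd : s.Nodup) {i : Nat}
    {c : Char} (hc : s[i]? = some c) :
    PySem.Chars.find s [c] = (i : Int) := by
  have hmem : c ∈ s := List.mem_of_getElem? hc
  have h0 : 0 ≤ PySem.Chars.find s [c] := (find_singleton_nonneg_iff s c).2 hmem
  obtain ⟨hlt, hg⟩ := find_singleton_spec h0
  have : (PySem.Chars.find s [c]).toNat = i :=
    List.getElem?_inj hlt hnd (hg.trans hc.symm)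
  omega

theorem pair_infix_find {s : List Char} (hnd : s.Nodup) {a c : Char}
    (h : [a, c] <:+: s) :
    PySem.Chars.find s [c] = PySem.Chars.find s [a] + 1 := by
  obtain ⟨pre, post, rfl⟩ := h
  have ha : PySem.Chars.find (pre ++ [a, c] ++ post) [a] = (pre.length : Int) := by
    refine find_eq_of_getElem hnd ?_
    rw [List.append_assoc, List.getElem?_append_right (le_refl _)]
    simp
  have hc : PySem.Chars.find (pre ++ [a, c] ++ post) [c] = ((pre.length + 1 : Nat) : Int) := by
    refine find_eq_of_getElem hnd ?_
    rw [List.append_assoc, List.getElem?_append_right (by omega)]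
    simp
  rw [ha, hc]; push_cast; ring

theorem infix_extend {s : List Char} (hnd : s.Nodup) {t : List Char} {a c : Char}
    (ht : t ++ [a] <:+: s)
    (hJ : PySem.Chars.find s [c] = PySem.Chars.find s [a] + 1) :
    t ++ [a, c] <:+: s := by
  obtain ⟨pre, post, hs⟩ := ht
  have hs' : (pre ++ t) ++ ([a] ++ post) = s := by rw [← hs]; simp
  have ha : PySem.Chars.find s [a] = ((pre.length + t.length : Nat) : Int) := by
    refine find_eq_of_getElem hnd ?_
    rw [← hs', List.getElem?_append_right (by simp)]
    simp
  have h0 : 0 ≤ PySem.Chars.find s [c] := by rw [hJ, ha]; positivity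
  obtain ⟨hlt, hg⟩ := find_singleton_spec h0
  have hJN : (PySem.Chars.find s [c]).toNat = pre.length + t.length + 1 := by
    rw [hJ, ha]; omega
  rw [hJN] at hlt hg
  have hs'' : ((pre ++ t) ++ [a]) ++ post = s := by rw [← hs]; simp
  rw [← hs'', List.getElem?_append_right (by simp; omega)] at hg
  simp at hg
  match post, hg with
  | d :: post', hg =>
    have hd : d = c := by simpa using hg
    exact ⟨pre, post', by rw [← hs, hd]; simp⟩

-- the core invariant of B's per-sequence fold
theorem seqFold_core (s : List Char) (hnd : s.Nodup) (xs : List Char) :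
    0 ≤ (seqFold s xs).1 ∧ (seqFold s xs).1 ≤ (xs.length : Int) ∧
    (∀ a, xs.getLast? = some a → (seqFold s xs).2 = PySem.Chars.find s [a]) ∧
    (1 ≤ (seqFold s xs).1 → 0 ≤ (seqFold s xs).2) ∧
    (∀ k : Nat, 1 ≤ k →
      ((k : Int) ≤ (seqFold s xs).1 ↔
        k ≤ xs.length ∧ xs.drop (xs.length - k) <:+: s)) := by
  induction xs using List.reverseRecOn with
  | nil =>
    refine ⟨by simp [seqFold], by simp [seqFold], by simp, by simp [seqFold], ?_⟩
    intro k hk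
    simp [seqFold]
    try omega
  | append_singleton xs c ih =>
    obtain ⟨ih0, ihlen, ihlast, ihprev, ihrun⟩ := ih
    have hfold : seqFold s (xs ++ [c]) = pvBStep c (seqFold s xs, s) := by
      simp [seqFold, List.foldl_append]
    have hlastc : ∀ a, (xs ++ [c]).getLast? = some a → a = c := by
      intro a ha; rw [List.getLast?_concat] at ha; exact (Option.some_inj.1 ha).symm
    have hlen1 : (xs ++ [c]).length = xs.length + 1 := by simp
    -- k = 1 suffix is [c]
    have hdrop1 : (xs ++ [c]).drop ((xs ++ [c]).length - 1) = [c] := by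
      rw [hlen1, Nat.add_sub_cancel, List.drop_append_of_le_length (le_refl _)]
      simp
    by_cases hJ0 : PySem.Chars.find s [c] < 0
    · -- c not in s : state resets to (0, J)
      have hstep : seqFold s (xs ++ [c]) = (0, PySem.Chars.find s [c]) := by
        rw [hfold]; simp only [pvBStep]; rw [if_pos hJ0]
      have hcs : c ∉ s := by
        rw [← find_singleton_nonneg_iff]; omega
      rw [hstep]
      refine ⟨le_refl 0, by positivity, ?_, by omega, ?_⟩
      · intro a ha; rw [hlastc a ha]
      · intro k hk
        constructor
        · intro h; exfalso; omega
        · rintro ⟨hk1, hinf⟩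
          exfalso
          rw [hlen1, List.drop_append_of_le_length (by omega)] at hinf
          exact hcs (hinf.subset (by simp))
    · rw [not_lt] at hJ0
      have hcs : c ∈ s := (find_singleton_nonneg_iff s c).1 hJ0
      by_cases hJj : PySem.Chars.find s [c] = (seqFold s xs).2 + 1
      · -- run extends
        have hstep : seqFold s (xs ++ [c]) = ((seqFold s xs).1 + 1, PySem.Chars.find s [c]) := by
          rw [hfold]; simp only [pvBStep]; rw [if_neg (not_lt.2 hJ0), if_pos hJj]
        rw [hstep]
        refine ⟨by omega, by rw [hlen1]; push_cast; omega, ?_, fun _ => hJ0, ?_⟩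
        · intro a ha; rw [hlastc a ha]
        · intro k hk
          constructor
          · intro hkr
            have hklen : k ≤ xs.length + 1 := by omega
            refine ⟨by rw [hlen1]; omega, ?_⟩
            rcases Nat.lt_or_ge k 2 with hk2 | hk2
            · -- k = 1
              have : k = 1 := by omega
              subst this
              rw [hdrop1]
              exact singleton_infix hcs
            · -- k ≥ 2
              have hk1r : ((k - 1 : Nat) : Int) ≤ (seqFold s xs).1 := by omega
              obtain ⟨hk1len, hinf⟩ := (ihrun (k - 1) (by omega)).1 hk1r
              have hr1 : (1 : Int) ≤ (seqFold s xs).1 := by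
                have : ((k - 1 : Nat) : Int) ≥ 1 := by omega
                omega
              have hxs_ne : xs ≠ [] := List.ne_nil_of_length_pos (by omega)
              obtain ⟨a, hga⟩ : ∃ a, xs.getLast? = some a :=
                ⟨xs.getLast hxs_ne, List.getLast?_eq_some_getLast hxs_ne⟩
              have hja : (seqFold s xs).2 = PySem.Chars.find s [a] := ihlast a hga
              have htne : xs.drop (xs.length - (k - 1)) ≠ [] :=
                List.ne_nil_of_length_pos (by rw [List.length_drop]; omega)
              have hlt : (xs.drop (xs.length - (k - 1))).getLast? = some a := by
                rw [← hga]
                conv_rhs => rw [← List.take_append_drop (xs.length - (k - 1)) xs]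
                rw [List.getLast?_append_of_ne_nil _ htne]
              obtain ⟨u, hu⟩ := List.getLast?_eq_some_iff.1 hlt
              have hext : xs.drop (xs.length - (k - 1)) ++ [c] <:+: s := by
                have h2 : u ++ [a, c] <:+: s := by
                  refine infix_extend hnd (hu ▸ hinf) ?_
                  rw [hJj, hja]
                rw [hu]
                simpa using h2
              rw [hlen1, List.drop_append_of_le_length (by omega)]
              have heq : xs.length + 1 - k = xs.length - (k - 1) := by omega
              rw [heq]
              exact hext
          · rintro ⟨hklen, hinf⟩
            rcases Nat.lt_or_ge k 2 with hk2 | hk2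
            · have : k = 1 := by omega
              subst this; push_cast; try omega
            · rw [hlen1, List.drop_append_of_le_length (by omega)] at hinf
              have heq : xs.length + 1 - k = xs.length - (k - 1) := by omega
              rw [heq] at hinf
              have hpre : xs.drop (xs.length - (k - 1)) <:+: s :=
                (List.prefix_append _ _).isInfix.trans hinf
              have := (ihrun (k - 1) (by omega)).2 ⟨by rw [hlen1] at hklen; omega, hpre⟩
              push_cast at this ⊢
              omega
      · -- run restarts at 1
        have hstep : seqFold s (xs ++ [c]) = (1, PySem.Chars.find s [c]) := by
          rw [hfold]; simp only [pvBStep]; rw [if_neg (not_lt.2 hJ0), if_neg hJj]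
        rw [hstep]
        refine ⟨by omega, by rw [hlen1]; push_cast; omega, ?_, fun _ => hJ0, ?_⟩
        · intro a ha; rw [hlastc a ha]
        · intro k hk
          constructor
          · intro hkr
            have : k = 1 := by omega
            subst this
            refine ⟨by rw [hlen1]; omega, ?_⟩
            rw [hdrop1]
            exact singleton_infix hcs
          · rintro ⟨hklen, hinf⟩
            rcases Nat.lt_or_ge k 2 with hk2 | hk2
            · have : k = 1 := by omega
              subst this; push_cast; try omega
            · exfalso
              rw [hlen1, List.drop_append_of_le_length (by omega)] at hinf
              have heq : xs.length + 1 - k = xs.length - (k - 1) := by omega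
              rw [heq] at hinf
              have hxs_ne : xs ≠ [] := List.ne_nil_of_length_pos (by rw [hlen1] at hklen; omega)
              obtain ⟨a, hga⟩ : ∃ a, xs.getLast? = some a :=
                ⟨xs.getLast hxs_ne, List.getLast?_eq_some_getLast hxs_ne⟩
              have htne : xs.drop (xs.length - (k - 1)) ≠ [] :=
                List.ne_nil_of_length_pos (by rw [List.length_drop, hlen1] at *; omega)
              have hlt : (xs.drop (xs.length - (k - 1))).getLast? = some a := by
                rw [← hga]
                conv_rhs => rw [← List.take_append_drop (xs.length - (k - 1)) xs]
                rw [List.getLast?_append_of_ne_nil _ htne]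
              obtain ⟨u, hu⟩ := List.getLast?_eq_some_iff.1 hlt
              have hac : [a, c] <:+: s := by
                refine List.IsInfix.trans ?_ hinf
                rw [hu, List.append_assoc]
                exact (List.suffix_append u ([a] ++ [c])).isInfix
              have := pair_infix_find hnd hac
              exact hJj (by rw [this, ihlast a hga])

theorem zip_map_self {α β : Type} (L : List α) (f : α → β) :
    (L.map f).zip L = L.map (fun x => (f x, x)) := by
  induction L with
  | nil => rfl
  | cons x L ih => simp [ih]

theorem bLoop_iff (m : Int) (xs ys : List Char) :
    pvBLoop m xs (SEQUENTIAL_STRINGS.map (fun s => seqFold s ys)) = true ↔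
    ∃ p : Nat, 1 ≤ p ∧ p ≤ xs.length ∧
      ∃ s ∈ SEQUENTIAL_STRINGS, m ≤ (seqFold s (ys ++ xs.take p)).1 := by
  induction xs generalizing ys with
  | nil => simp [pvBLoop]
  | cons c rest ih =>
    have hstate : ((SEQUENTIAL_STRINGS.map (fun s => seqFold s ys)).zip SEQUENTIAL_STRINGS).map (pvBStep c)
        = SEQUENTIAL_STRINGS.map (fun s => seqFold s (ys ++ [c])) := by
      rw [zip_map_self, List.map_map]
      exact List.map_congr_left (fun s _ => by simp [seqFold, List.foldl_append])
    show (if _ then true else pvBLoop m rest _) = true ↔ _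
    rw [hstate]
    by_cases hany : (SEQUENTIAL_STRINGS.map (fun s => seqFold s (ys ++ [c]))).any
        (fun rp => decide (m ≤ rp.1)) = true
    · rw [if_pos hany]
      simp only [true_iff]
      obtain ⟨rp, hrp, hle⟩ := List.any_eq_true.1 hany
      obtain ⟨s, hs, rfl⟩ := List.mem_map.1 hrp
      exact ⟨1, le_refl 1, by simp, s, hs, by simpa using hle⟩
    · rw [if_neg hany, ih (ys ++ [c])]
      constructor
      · rintro ⟨p, hp1, hp2, s, hs, hm⟩
        refine ⟨p + 1, by omega, by simp; omega, s, hs, ?_⟩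
        simpa [List.append_assoc] using hm
      · rintro ⟨p, hp1, hp2, s, hs, hm⟩
        match p, hp1 with
        | q + 1, _ =>
          rcases Nat.eq_zero_or_pos q with hq | hq
          · subst hq
            exfalso
            apply hany
            refine List.any_eq_true.2 ⟨seqFold s (ys ++ [c]), List.mem_map.2 ⟨s, hs, rfl⟩, ?_⟩
            simpa using hm
          · refine ⟨q, hq, by simp at hp2; omega, s, hs, ?_⟩
            simpa [List.append_assoc] using hm

theorem seqs_nodup : ∀ s ∈ SEQUENTIAL_STRINGS, s.Nodup := by decide

theorem pvALoop_iff (l : List Char) (m stop : Int) (i : Int) :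
    pvALoop l m stop i = true ↔
    ∃ j : Int, i ≤ j ∧ j < stop ∧
      (SEQUENTIAL_STRINGS.any fun seq =>
        PySem.Chars.isIn (PySem.List.slice l (some j) (some (j + m))) seq) = true := by
  generalize hfuel : (stop - i).toNat = fuel
  induction fuel generalizing i with
  | zero =>
    rw [pvALoop, dif_neg (by omega)]
    constructor
    · intro h; simp at h
    · rintro ⟨j, hj1, hj2, -⟩; omega
  | succ n ih =>
    rw [pvALoop, dif_pos (by omega)]
    by_cases hbody : (SEQUENTIAL_STRINGS.any fun seq =>
        PySem.Chars.isIn (PySem.List.slice l (some i) (some (i + m))) seq) = true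
    · rw [if_pos hbody]
      exact iff_of_true rfl ⟨i, le_refl i, by omega, hbody⟩
    · rw [if_neg hbody, ih (i + 1) (by omega)]
      constructor
      · rintro ⟨j, hj1, hj2, hj3⟩
        exact ⟨j, by omega, hj2, hj3⟩
      · rintro ⟨j, hj1, hj2, hj3⟩
        refine ⟨j, ?_, hj2, hj3⟩
        rcases eq_or_lt_of_le hj1 with rfl | h
        · exact absurd hj3 hbody
        · omega

theorem A_iff (password : String) (m : Int) (hm : 1 ≤ m) :
    has_sequential_pattern password m = true ↔
    ∃ p : Nat, 1 ≤ p ∧ p ≤ (PySem.Chars.lower password.toList).length ∧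
      ∃ s ∈ SEQUENTIAL_STRINGS, m.toNat ≤ p ∧
        ((PySem.Chars.lower password.toList).take p).drop (p - m.toNat) <:+: s := by
  unfold has_sequential_pattern
  set l := PySem.Chars.lower password.toList with hl
  rw [pvALoop_iff]
  simp only [List.any_eq_true]
  constructor
  · rintro ⟨i, hi0, hilt, s, hs, hiss⟩
    have hslice : PySem.List.slice l (some i) (some (i + m)) = (l.drop i.toNat).take m.toNat := by
      rw [PySem.List.slice_toNat l hi0 (by omega)]
      congr 1
      omega
    refine ⟨i.toNat + m.toNat, by omega, by omega, s, hs, by omega, ?_⟩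
    have h2 : (l.take (i.toNat + m.toNat)).drop (i.toNat + m.toNat - m.toNat) =
        (l.drop i.toNat).take m.toNat := by
      rw [Nat.add_sub_cancel, List.drop_take, Nat.add_sub_cancel_left]
    rw [h2, ← hslice, ← PySem.Chars.isIn_iff_infix]
    exact hiss
  · rintro ⟨p, hp1, hpn, s, hs, hMp, hinf⟩
    refine ⟨((p - m.toNat : Nat) : Int), by positivity, by omega, s, hs, ?_⟩
    rw [PySem.Chars.isIn_iff_infix]
    have hslice : PySem.List.slice l (some ((p - m.toNat : Nat) : Int))
        (some (((p - m.toNat : Nat) : Int) + m)) = (l.drop (p - m.toNat)).take m.toNat := by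
      rw [PySem.List.slice_toNat l (by positivity) (by omega), Int.toNat_natCast]
      congr 1
      omega
    rw [hslice]
    have h2 : (l.take p).drop (p - m.toNat) = (l.drop (p - m.toNat)).take m.toNat := by
      rw [List.drop_take]
      congr 1
      omega
    rwa [h2] at hinf

theorem B_iff (password : String) (m : Int) (hm : 1 ≤ m) :
    has_sequential_pattern_alt password m = true ↔
    ∃ p : Nat, 1 ≤ p ∧ p ≤ (PySem.Chars.lower password.toList).length ∧
      ∃ s ∈ SEQUENTIAL_STRINGS, m.toNat ≤ p ∧
        ((PySem.Chars.lower password.toList).take p).drop (p - m.toNat) <:+: s := by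
  unfold has_sequential_pattern_alt
  rw [if_neg (by omega)]
  set l := PySem.Chars.lower password.toList with hl
  have h0 : (SEQUENTIAL_STRINGS.map fun _ => ((0 : Int), (-2 : Int))) =
      SEQUENTIAL_STRINGS.map (fun s => seqFold s []) := rfl
  rw [h0, bLoop_iff]
  refine exists_congr fun p => and_congr_right fun hp1 => and_congr_right fun hpn => ?_
  constructor
  · rintro ⟨s, hs, hle⟩
    have core := seqFold_core s (seqs_nodup s hs) (l.take p)
    have hlen : (l.take p).length = p := by rw [List.length_take]; omega
    have h5 := (core.2.2.2.2 m.toNat (by omega)).1 (by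
      simp only [List.nil_append] at hle
      have : ((m.toNat : Nat) : Int) = m := by omega
      rw [this]
      exact hle)
    rw [hlen] at h5
    exact ⟨s, hs, h5.1, h5.2⟩
  · rintro ⟨s, hs, hMp, hinf⟩
    have core := seqFold_core s (seqs_nodup s hs) (l.take p)
    have hlen : (l.take p).length = p := by rw [List.length_take]; omega
    refine ⟨s, hs, ?_⟩
    simp only [List.nil_append]
    have h5 := (core.2.2.2.2 m.toNat (by omega)).2 (by rw [hlen]; exact ⟨hMp, hinf⟩)
    have : ((m.toNat : Nat) : Int) = m := by omega
    rwa [this] at h5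

theorem ports_agree : ∀ (password : String) (min_len : Int),
    has_sequential_pattern password min_len = has_sequential_pattern_alt password min_len := by
  intro password min_len
  by_cases hm : min_len ≤ 0
  · have hB : has_sequential_pattern_alt password min_len = true := by
      unfold has_sequential_pattern_alt; rw [if_pos hm]
    rw [hB]
    unfold has_sequential_pattern
    set l := PySem.Chars.lower password.toList with hl
    apply (pvALoop_iff l min_len ((l.length : Int) - min_len + 1) 0).2
    refine ⟨(l.length : Int), by positivity, by omega, ?_⟩
    have hempty : PySem.List.slice l (some (l.length : Int))
        (some ((l.length : Int) + min_len)) = [] := by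
      apply List.eq_nil_of_length_eq_zero
      rw [PySem.List.length_slice]
      have h1 := PySem.List.clampIdx_le l.length ((l.length : Int) + min_len)
      have h2 := PySem.List.clampIdx_natCast l.length l.length
      omega
    show (SEQUENTIAL_STRINGS.any fun seq =>
      PySem.Chars.isIn (PySem.List.slice l (some (l.length : Int))
        (some ((l.length : Int) + min_len))) seq) = true
    rw [hempty]
    exact List.any_eq_true.2 ⟨"abcdefghijklmnopqrstuvwxyz".toList, by simp [SEQUENTIAL_STRINGS],
      PySem.Chars.isIn_nil _⟩
  · have hm1 : 1 ≤ min_len := by omega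
    rw [Bool.eq_iff_iff, A_iff password min_len hm1, B_iff password min_len hm1]

-- ===== VERDICT (by name: the statement is the Claim_ definition above) =====
theorem has_sequential_pattern_spec : Claim_equal_has_sequential_pattern := by
  intro password min_len _
  unfold Spec_has_sequential_pattern
  exact ports_agree password min_len
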